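-- pv_equiv track=rewrite | github.com/hvanchor/CS1010A | A20:21 P1 practical-template.py | pyramids
-- ===== SOURCE A (Python) =====
-- def pyramids(n):
--     def bottom(n):
--         if n<=2:
--             return n
--         else:
--             return bottom(n-1) + bottom(n-2)
--     if n == 1:
--         return 1
--     else:
--         return bottom(n)*pyramids(n-1)
-- ===== SOURCE B (Python) =====
-- def pyramids(n):
--     # Iterative: bottom(k) follows a Fibonacci-like pair (a,b), product accumulated in one pass.
--     prod = 1
--     a, b = 1, 2
--     for _ in range(n):
--         prod *= a
--         a, b = b, a + b
--     return prod
-- ===== Notes on version B (the rewrite author's own statement) =====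
-- stated objective: faster
-- what changed: Replaces the exponential recursive bottom() plus recursive product with a single loop maintaining a Fibonacci-like pair and a running product; intended as faster (asymptotic), though a timing run could not confirm a ratio because A times out on the larger generated sizes.
import Mathlib
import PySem

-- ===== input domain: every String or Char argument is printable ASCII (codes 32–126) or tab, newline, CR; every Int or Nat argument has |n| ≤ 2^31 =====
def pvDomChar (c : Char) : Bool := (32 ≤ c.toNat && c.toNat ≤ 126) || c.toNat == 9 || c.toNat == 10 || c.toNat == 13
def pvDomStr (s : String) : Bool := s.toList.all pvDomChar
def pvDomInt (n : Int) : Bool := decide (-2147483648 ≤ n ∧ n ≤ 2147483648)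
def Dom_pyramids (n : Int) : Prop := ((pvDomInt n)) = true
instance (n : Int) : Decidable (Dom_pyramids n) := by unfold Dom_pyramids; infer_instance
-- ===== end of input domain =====

-- B replaces A's double recursion with one loop (pair update + running product); intended as faster, though a timing run could not confirm it (A times out on the larger sizes).

-- ===== PORT A =====
-- inner helper bottom(n) of A, literal double recursion
def pyrBottom (n : Int) : Int :=
  if n ≤ 2 then n
  else pyrBottom (n - 1) + pyrBottom (n - 2)
termination_by n.toNat
decreasing_by all_goals omega

def pyramids (n : Int) : Int :=
  if n = 1 then 1
  else if _h : n ≤ 1 then 0   -- Python recurses forever here (n ≤ 0); excluded by Pre_; guard only for totality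
  else pyrBottom n * pyramids (n - 1)
termination_by n.toNat
decreasing_by omega

-- ===== PORT B =====
def pyramids_alt (n : Int) : Int :=
  ((PySem.List.pyRange 0 n 1).foldl
    (fun (s : Int × Int × Int) _ => (s.1 * s.2.1, s.2.2, s.2.1 + s.2.2))
    (1, 1, 2)).1

-- ===== PRECONDITION & SPEC =====
-- A recurses without termination (RecursionError) for n ≤ 0, and pyramids(0) is likewise unreached; Python A returns normally exactly for n ≥ 1.
def Pre_pyramids (n : Int) : Prop := 1 ≤ n
instance (n : Int) : Decidable (Pre_pyramids n) := by unfold Pre_pyramids; infer_instance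
def pvWitness_pyramids : Int := (3)

def Spec_pyramids (n : Int) (out : Int) : Prop := out = pyramids_alt n
instance (n : Int) (out : Int) : Decidable (Spec_pyramids n out) := by unfold Spec_pyramids; infer_instance

-- ===== CLAIM (what is proved, stated in full; the proofs are below) =====
def Claim_equal_pyramids : Prop := ∀ (n : Int), Dom_pyramids n → Pre_pyramids n → Spec_pyramids n (pyramids n)

-- ===== LEMMAS AND PROOFS =====

-- loop step of B
def pyrStep (s : Int × Int × Int) : Int × Int × Int := (s.1 * s.2.1, s.2.2, s.2.1 + s.2.2)

-- running product ∏_{k=1}^{n} bottom(k)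
def pyrProd : Nat → Int
  | 0 => 1
  | Nat.succ k => pyrProd k * pyrBottom (↑k + 1)

lemma pyrBottom_succ_succ (k : Nat) :
    pyrBottom (↑k + 3) = pyrBottom (↑k + 2) + pyrBottom (↑k + 1) := by
  rw [pyrBottom]
  have h : ¬ ((k : Int) + 3 ≤ 2) := by omega
  simp only [if_neg h]
  ring_nf

lemma pyr_state (n : Nat) :
    (PySem.List.pyRange 0 (↑n) 1).foldl (fun (s : Int × Int × Int) _ => pyrStep s) (1, 1, 2)
      = (pyrProd n, pyrBottom (↑n + 1), pyrBottom (↑n + 2)) := by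
  induction n with
  | zero =>
      simp [pyrProd]
      constructor <;> (rw [pyrBottom]; norm_num)
  | succ k ih =>
      have h : (0 : Int) ≤ ↑k := by positivity
      have : ((k : Int) + 1) = ((k : Int)) + 1 := rfl
      rw [show ((k + 1 : Nat) : Int) = (k : Int) + 1 by push_cast; ring,
          PySem.List.pyRange_one_succ_right h, List.foldl_append, ih]
      simp only [List.foldl_cons, List.foldl_nil, pyrStep, pyrProd, Prod.mk.injEq]
      refine ⟨trivial, by rw [show (k : Int) + 1 + 1 = (k : Int) + 2 by ring], ?_⟩
      have := pyrBottom_succ_succ k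
      rw [show (k : Int) + 1 + 2 = (k : Int) + 3 by ring, this]
      ring

lemma pyramids_alt_eq (n : Nat) : pyramids_alt (↑n) = pyrProd n := by
  unfold pyramids_alt
  rw [show (fun (s : Int × Int × Int) _ => (s.1 * s.2.1, s.2.2, s.2.1 + s.2.2))
        = (fun (s : Int × Int × Int) (_ : Int) => pyrStep s) from rfl, pyr_state]

lemma pyramids_eq_prod (n : Nat) (h : 1 ≤ n) : pyramids (↑n) = pyrProd n := by
  induction n with
  | zero => omega
  | succ k ih =>
      by_cases hk : k = 0
      · subst hk
        rw [pyramids]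
        norm_num [pyrProd]
        rw [pyrBottom]; norm_num
      · have hk1 : 1 ≤ k := by omega
        rw [pyramids]
        have h1 : ¬ ((k + 1 : Nat) : Int) = 1 := by push_cast; omega
        have h2 : ¬ ((k + 1 : Nat) : Int) ≤ 1 := by push_cast; omega
        simp only [if_neg h1, dif_neg h2]
        rw [show ((k + 1 : Nat) : Int) - 1 = (↑k : Int) by push_cast; ring, ih hk1]
        simp only [pyrProd]
        rw [show ((k + 1 : Nat) : Int) = (k : Int) + 1 by push_cast; ring]
        ring

-- ===== VERDICT (by name: the statement is the Claim_ definition above) =====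
theorem pyramids_spec : Claim_equal_pyramids := by
  intro n _ hpre
  unfold Spec_pyramids
  have hn : n = ((n.toNat : Nat) : Int) := by
    have := Int.toNat_of_nonneg (le_trans (by norm_num) hpre)
    omega
  rw [hn, pyramids_alt_eq, pyramids_eq_prod]
  unfold Pre_pyramids at hpre
  omega
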